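-- pv_equiv track=rewrite | github.com/andrianiainafn/problem_solving | ccc/level_1.py | count_directions
-- ===== SOURCE A (Python) =====
-- def count_directions(paths):
--     counts = [0, 0, 0, 0]
--     for direction in paths:
--         if direction == 'W':
--             counts[0] += 1
--         elif direction == 'D':
--             counts[1] += 1
--         elif direction == 'S':
--             counts[2] += 1
--         elif direction == 'A':
--             counts[3] += 1
--     return counts
-- ===== SOURCE B (Python) =====
-- def count_directions(paths):
--     return [paths.count(c) for c in 'WDSA']
-- ===== Notes on version B (the rewrite author's own statement) =====
-- stated objective: idiomatic
-- what changed: Replaces the single pass with a mutable four-slot counter and if/elif dispatch by four independent paths.count scans, one per direction, composed in a comprehension.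
import Mathlib
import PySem

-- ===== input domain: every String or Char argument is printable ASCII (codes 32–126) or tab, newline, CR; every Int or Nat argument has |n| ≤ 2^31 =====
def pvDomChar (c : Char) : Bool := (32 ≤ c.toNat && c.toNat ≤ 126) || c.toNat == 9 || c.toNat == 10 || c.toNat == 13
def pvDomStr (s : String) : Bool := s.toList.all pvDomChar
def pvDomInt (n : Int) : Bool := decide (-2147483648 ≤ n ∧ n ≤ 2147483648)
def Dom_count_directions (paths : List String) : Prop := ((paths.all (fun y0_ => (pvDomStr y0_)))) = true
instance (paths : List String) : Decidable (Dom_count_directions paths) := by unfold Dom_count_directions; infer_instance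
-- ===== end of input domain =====

-- B replaces A's single pass with a four-way if/elif counter by four independent
-- `paths.count` scans in a comprehension (objective: idiomatic; same asymptotic cost).

-- ===== PORT A =====
-- the counts list [0,0,0,0] is carried as a 4-tuple of its entries; each elif branch
-- increments the corresponding component, and the tuple is returned as a list.
def count_directions (paths : List String) : List Int :=
  let counts :=
    paths.foldl (fun counts direction =>
      if direction = "W" then (counts.1 + 1, counts.2.1, counts.2.2.1, counts.2.2.2)
      else if direction = "D" then (counts.1, counts.2.1 + 1, counts.2.2.1, counts.2.2.2)
      else if direction = "S" then (counts.1, counts.2.1, counts.2.2.1 + 1, counts.2.2.2)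
      else if direction = "A" then (counts.1, counts.2.1, counts.2.2.1, counts.2.2.2 + 1)
      else counts)
      ((0 : Int), (0 : Int), (0 : Int), (0 : Int))
  [counts.1, counts.2.1, counts.2.2.1, counts.2.2.2]

-- ===== PORT B =====
-- [paths.count(c) for c in 'WDSA']: iterate over the characters of "WDSA",
-- each yielding the one-character string counted in paths.
def count_directions_alt (paths : List String) : List Int :=
  "WDSA".toList.map (fun c => (PySem.List.count paths (String.ofList [c]) : Int))

-- ===== PRECONDITION & SPEC =====
def Spec_count_directions (paths : List String) (out : List Int) : Prop := out = count_directions_alt paths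
instance (paths : List String) (out : List Int) : Decidable (Spec_count_directions paths out) := by unfold Spec_count_directions; infer_instance

-- ===== CLAIM (what is proved, stated in full; the proofs are below) =====
def Claim_equal_count_directions : Prop := ∀ (paths : List String), Dom_count_directions paths → Spec_count_directions paths (count_directions paths)

-- ===== LEMMAS AND PROOFS =====
theorem count_directions_fold (paths : List String) (w d s a : Int) :
    paths.foldl (fun counts direction =>
      if direction = "W" then (counts.1 + 1, counts.2.1, counts.2.2.1, counts.2.2.2)
      else if direction = "D" then (counts.1, counts.2.1 + 1, counts.2.2.1, counts.2.2.2)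
      else if direction = "S" then (counts.1, counts.2.1, counts.2.2.1 + 1, counts.2.2.2)
      else if direction = "A" then (counts.1, counts.2.1, counts.2.2.1, counts.2.2.2 + 1)
      else counts) (w, d, s, a)
    = (w + (paths.count "W" : Int), d + (paths.count "D" : Int),
       s + (paths.count "S" : Int), a + (paths.count "A" : Int)) := by
  induction paths generalizing w d s a with
  | nil => simp
  | cons p ps ih =>
    simp only [List.foldl_cons, List.count_cons]
    by_cases h1 : p = "W"
    · subst h1; rw [if_pos rfl, ih]; simp; omega
    rw [if_neg h1]
    by_cases h2 : p = "D"
    · subst h2; rw [if_pos rfl, ih]; simp; omega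
    rw [if_neg h2]
    by_cases h3 : p = "S"
    · subst h3; rw [if_pos rfl, ih]; simp; omega
    rw [if_neg h3]
    by_cases h4 : p = "A"
    · subst h4; rw [if_pos rfl, ih]; simp; omega
    rw [if_neg h4, ih]
    simp [h1, h2, h3, h4]

-- ===== VERDICT (by name: the statement is the Claim_ definition above) =====
theorem count_directions_spec : Claim_equal_count_directions := by
  intro paths _
  show _ = _
  simp [count_directions, count_directions_alt, count_directions_fold,
    PySem.List.count, show String.ofList ['W'] = "W" from rfl,
    show String.ofList ['D'] = "D" from rfl,
    show String.ofList ['S'] = "S" from rfl,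
    show String.ofList ['A'] = "A" from rfl]
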